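-- pv_equiv track=rewrite | github.com/michaelliudl/CodingInterviewPython | com/leetcode/greedy/02285_m_maximum total importance of roads.py | maximumImportanceHeap
-- ===== SOURCE A (Python) =====
-- from typing import List, DefaultDict
-- import heapq
--
-- def maximumImportanceHeap(n: int, roads: List[List[int]]) -> int:
--     graph = DefaultDict(list)
--     for start, end in roads:
--         graph[start].append(end)
--         graph[end].append(start)
--     heap = []
--     for _, neighbors in graph.items():
--         heapq.heappush(heap, -len(neighbors))
--     res = 0
--     for score in range(n, 0, -1):
--         if not heap:
--             break
--         res += score * (-heapq.heappop(heap))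
--     return res
-- ===== SOURCE B (Python) =====
-- def maximumImportanceHeap(n, roads):
--     deg = {}
--     for start, end in roads:
--         deg[start] = deg.get(start, 0) + 1
--         deg[end] = deg.get(end, 0) + 1
--     degrees = sorted(deg.values(), reverse=True)
--     return sum(label * d for label, d in zip(range(n, 0, -1), degrees))
-- ===== Notes on version B (the rewrite author's own statement) =====
-- stated objective: simpler
-- what changed: Replaces the adjacency-list defaultdict, the heap of negated degrees and the push/pop loop with explicit break by a flat degree counter, one library sort in descending order, and a single zip with the descending labels (zip truncation replaces the 'if not heap: break' guard).
import Mathlib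
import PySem

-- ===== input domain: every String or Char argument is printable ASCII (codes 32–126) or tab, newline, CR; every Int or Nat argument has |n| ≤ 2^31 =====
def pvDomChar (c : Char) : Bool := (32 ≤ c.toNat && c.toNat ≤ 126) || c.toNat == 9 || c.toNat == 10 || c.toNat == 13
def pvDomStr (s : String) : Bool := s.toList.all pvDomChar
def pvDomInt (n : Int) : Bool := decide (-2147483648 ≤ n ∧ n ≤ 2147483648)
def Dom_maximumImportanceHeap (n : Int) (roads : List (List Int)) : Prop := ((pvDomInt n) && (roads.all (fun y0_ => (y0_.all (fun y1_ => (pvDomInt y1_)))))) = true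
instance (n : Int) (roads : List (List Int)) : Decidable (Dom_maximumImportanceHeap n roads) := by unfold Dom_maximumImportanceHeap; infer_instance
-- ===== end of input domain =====

-- B replaces A's adjacency defaultdict + heap push/pop loop by a flat degree counter,
-- one descending sort, and a zip with the labels n..1 (objective: simpler).

-- ===== PORT A =====
-- heapq is modelled as a multiset of ints: heappush appends, heappop removes the
-- minimum VALUE — observably exact for a heap of ints (ties are indistinguishable).
def pvGraphA (roads : List (List Int)) : PySem.Dict Int (List Int) :=
  roads.foldl (fun g r =>
    match r with
    | [a, b] => (g.modify a [] (· ++ [b])).modify b [] (· ++ [a])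
    | _ => g) PySem.Dict.empty

def pvHeapA (roads : List (List Int)) : List Int :=
  (pvGraphA roads).items.foldl (fun h p => h ++ [-(p.2.length : Int)]) []

-- 'for score in range(n, 0, -1): if not heap: break; res += score * (-heappop(heap))'
def pvPopLoop : List Int → List Int → Int → Int
  | [], _, res => res
  | _ :: _, [], res => res
  | s :: ss, x :: xs, res =>
      let m := xs.foldl min x
      pvPopLoop ss ((x :: xs).erase m) (res + s * (-m))

def maximumImportanceHeap (n : Int) (roads : List (List Int)) : Int :=
  pvPopLoop (PySem.List.pyRange n 0 (-1)) (pvHeapA roads) 0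

-- ===== PORT B =====
def pvDegB (roads : List (List Int)) : PySem.Dict Int Int :=
  roads.foldl (fun d r =>
    match r with
    | [a, b] => (d.modify a 0 (· + 1)).modify b 0 (· + 1)
    | _ => d) PySem.Dict.empty

def maximumImportanceHeap_alt (n : Int) (roads : List (List Int)) : Int :=
  let degrees := PySem.List.sorted (pvDegB roads).values (fun x => x) true
  ((PySem.List.pyRange n 0 (-1)).zip degrees).foldl (fun acc p => acc + p.1 * p.2) 0

-- ===== PRECONDITION & SPEC =====
-- Pre_ excludes exactly the inputs on which both Pythons raise ValueError:
-- a road that is not a two-element pair fails the unpacking 'start, end = road'.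
def Pre_maximumImportanceHeap (n : Int) (roads : List (List Int)) : Prop :=
  ∀ r ∈ roads, r.length = 2
instance (n : Int) (roads : List (List Int)) : Decidable (Pre_maximumImportanceHeap n roads) := by
  unfold Pre_maximumImportanceHeap; infer_instance

def pvWitness_maximumImportanceHeap : Int × List (List Int) := (3, [[0, 1], [1, 2]])

def Spec_maximumImportanceHeap (n : Int) (roads : List (List Int)) (out : Int) : Prop := out = maximumImportanceHeap_alt n roads
instance (n : Int) (roads : List (List Int)) (out : Int) : Decidable (Spec_maximumImportanceHeap n roads out) := by unfold Spec_maximumImportanceHeap; infer_instance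

-- ===== CLAIM (what is proved, stated in full; the proofs are below) =====
def Claim_equal_maximumImportanceHeap : Prop := ∀ (n : Int) (roads : List (List Int)), Dom_maximumImportanceHeap n roads → Pre_maximumImportanceHeap n roads → Spec_maximumImportanceHeap n roads (maximumImportanceHeap n roads)

-- ===== LEMMAS AND PROOFS =====

-- relation between A's adjacency dict and B's degree dict: same keys in the same
-- order, B's value = length of A's neighbour list
def pvLen (p : Int × List Int) : Int × Int := (p.1, (p.2.length : Int))

theorem pv_getD_rel (g : PySem.Dict Int (List Int)) (d : PySem.Dict Int Int)
    (hI : d.items = g.items.map pvLen) (k : Int) :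
    d.getD k 0 = ((g.getD k []).length : Int) := by
  simp only [PySem.Dict.getD, PySem.Dict.get?, hI, List.find?_map]
  cases hf : List.find? (fun p => p.1 == k) g.items with
  | none =>
      have : List.find? ((fun p : Int × Int => p.1 == k) ∘ pvLen) g.items = none := by
        simpa [pvLen] using hf
      simp [this]
  | some p =>
      have : List.find? ((fun p : Int × Int => p.1 == k) ∘ pvLen) g.items = some p := by
        simpa [pvLen] using hf
      simp [this, pvLen]

theorem pv_contains_rel (g : PySem.Dict Int (List Int)) (d : PySem.Dict Int Int)
    (hI : d.items = g.items.map pvLen) (k : Int) :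
    d.contains k = g.contains k := by
  rw [PySem.Dict.contains_eq_decide_mem_keys, PySem.Dict.contains_eq_decide_mem_keys]
  have hk : d.keys = g.keys := by
    simp [PySem.Dict.keys, hI, pvLen, Function.comp]
  rw [hk]

theorem pv_step_rel (g : PySem.Dict Int (List Int)) (d : PySem.Dict Int Int)
    (hI : d.items = g.items.map pvLen) (a : Int) (v : Int) :
    (d.insert a (d.getD a 0 + 1)).items
      = (g.insert a (g.getD a [] ++ [v])).items.map pvLen := by
  simp only [PySem.Dict.insert, pv_contains_rel g d hI a]
  by_cases hc : g.contains a = true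
  · simp only [hc, if_pos, hI, List.map_map]
    apply List.map_congr_left
    intro p _
    by_cases hp : p.1 = a
    · simp [hp, pvLen, pv_getD_rel g d hI a]
    · simp [hp, pvLen]
  · simp only [hc, hI]
    have hc' : g.contains a = false := by simpa using hc
    have hg : g.getD a [] = [] := PySem.Dict.getD_of_not_contains g _ hc'
    have hd : d.getD a 0 = 0 := by rw [pv_getD_rel g d hI a, hg]; rfl
    simp [hd, hg, pvLen]

theorem pv_build_rel (roads : List (List Int)) (hlen : ∀ r ∈ roads, r.length = 2) :
    ∀ (g : PySem.Dict Int (List Int)) (d : PySem.Dict Int Int),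
    d.items = g.items.map pvLen →
    (roads.foldl (fun d r =>
      match r with
      | [a, b] => (d.modify a 0 (· + 1)).modify b 0 (· + 1)
      | _ => d) d).items
    = (roads.foldl (fun g r =>
      match r with
      | [a, b] => (g.modify a [] (· ++ [b])).modify b [] (· ++ [a])
      | _ => g) g).items.map pvLen := by
  induction roads with
  | nil => intro g d hI; simpa using hI
  | cons r rs ih =>
      intro g d hI
      have hr : r.length = 2 := hlen r (List.mem_cons_self ..)
      have hrs : ∀ r' ∈ rs, r'.length = 2 := fun r' h' => hlen r' (List.mem_cons_of_mem _ h')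
      match r, hr with
      | [a, b], _ =>
          apply ih hrs
          have h1 := pv_step_rel g d hI a b
          exact pv_step_rel _ _ h1 b a

theorem pv_deg_graph (roads : List (List Int)) (hlen : ∀ r ∈ roads, r.length = 2) :
    (pvDegB roads).items = (pvGraphA roads).items.map pvLen := by
  unfold pvDegB pvGraphA
  exact pv_build_rel roads hlen _ _ rfl

-- the minimum of a nonempty list is a permutation invariant
theorem pv_min_perm (x y : Int) (xs ys : List Int)
    (h : (x :: xs).Perm (y :: ys)) : xs.foldl min x = ys.foldl min y := by
  have h1 := PySem.List.foldl_min_le xs x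
  have h2 := PySem.List.foldl_min_le ys y
  have m1mem : xs.foldl min x ∈ x :: xs := by
    rcases PySem.List.foldl_min_mem xs x with h' | h'
    · simp [h']
    · simp [h']
  have m2mem : ys.foldl min y ∈ y :: ys := by
    rcases PySem.List.foldl_min_mem ys y with h' | h'
    · simp [h']
    · simp [h']
  have le1 : ∀ z ∈ x :: xs, xs.foldl min x ≤ z := by
    intro z hz
    rcases List.mem_cons.mp hz with rfl | hz
    · exact h1.1
    · exact h1.2 z hz
  have le2 : ∀ z ∈ y :: ys, ys.foldl min y ≤ z := by
    intro z hz
    rcases List.mem_cons.mp hz with rfl | hz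
    · exact h2.1
    · exact h2.2 z hz
  exact le_antisymm (le1 _ (h.mem_iff.mpr m2mem)) (le2 _ (h.symm.mem_iff.mpr m1mem))

theorem pvPopLoop_perm (ss : List Int) :
    ∀ (h1 h2 : List Int) (res : Int), h1.Perm h2 →
    pvPopLoop ss h1 res = pvPopLoop ss h2 res := by
  induction ss with
  | nil => intro h1 h2 res _; rfl
  | cons s ss ih =>
      intro h1 h2 res hp
      match h1, h2 with
      | [], [] => rfl
      | [], y :: ys => exact absurd hp.length_eq (by simp)
      | x :: xs, [] => exact absurd hp.length_eq (by simp)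
      | x :: xs, y :: ys =>
          simp only [pvPopLoop]
          rw [pv_min_perm x y xs ys hp]
          exact ih _ _ _ (hp.erase _)

theorem pv_min_sorted (x : Int) (xs : List Int)
    (h : (x :: xs).Pairwise (· ≤ ·)) : xs.foldl min x = x := by
  rcases PySem.List.foldl_min_mem xs x with h' | h'
  · exact h'
  · have hx : x ≤ xs.foldl min x := (List.pairwise_cons.mp h).1 _ h'
    exact le_antisymm (PySem.List.foldl_min_le xs x).1 hx

-- the pop loop over the negated, ascending heap is the zip sum over the descending degrees
theorem pvPopLoop_sorted (ss : List Int) :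
    ∀ (ds : List Int) (res : Int), ds.Pairwise (fun a b => b ≤ a) →
    pvPopLoop ss (ds.map (fun d => -d)) res
      = res + (ss.zip ds).foldl (fun acc p => acc + p.1 * p.2) 0 := by
  induction ss with
  | nil => intro ds res _; simp [pvPopLoop]
  | cons s ss ih =>
      intro ds res hp
      match ds with
      | [] => simp [pvPopLoop]
      | d :: ds' =>
          simp only [List.map_cons, pvPopLoop]
          have hsorted : ((-d) :: ds'.map (fun d => -d)).Pairwise (· ≤ ·) := by
            simp only [← List.map_cons, List.pairwise_map]
            exact hp.imp (fun h => by omega)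
          rw [pv_min_sorted _ _ hsorted, List.erase_cons_head]
          rw [ih ds' _ (List.pairwise_cons.mp hp).2]
          have key : ((s :: ss).zip (d :: ds')).foldl (fun acc p => acc + p.1 * p.2) 0
              = s * d + (ss.zip ds').foldl (fun acc p => acc + p.1 * p.2) 0 := by
            simp only [List.zip_cons_cons, List.foldl_cons]
            rw [PySem.List.foldl_add (ss.zip ds') (fun p => p.1 * p.2) (0 + s * d),
                PySem.List.foldl_add (ss.zip ds') (fun p => p.1 * p.2) 0]
            ring
          rw [key]
          have hneg : s * - -d = s * d := by ring
          omega

-- ===== VERDICT (by name: the statement is the Claim_ definition above) =====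
theorem maximumImportanceHeap_spec : Claim_equal_maximumImportanceHeap := by
  intro n roads _ hpre
  unfold Spec_maximumImportanceHeap maximumImportanceHeap maximumImportanceHeap_alt
  have hheap : pvHeapA roads = (pvDegB roads).values.map (fun d => -d) := by
    unfold pvHeapA
    rw [PySem.List.foldl_append_singleton_eq_map]
    simp [PySem.Dict.values, pv_deg_graph roads hpre, pvLen, Function.comp]
  set ds := PySem.List.sorted (pvDegB roads).values (fun x => x) true with hds
  have hperm : ((pvDegB roads).values.map (fun d => -d)).Perm (ds.map (fun d => -d)) :=
    (PySem.List.sorted_perm _ _ _).symm.map _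
  have hpair : ds.Pairwise (fun a b => b ≤ a) := by
    simpa using PySem.List.sorted_pairwise_rev (xs := (pvDegB roads).values) (key := fun x => x)
  rw [hheap, pvPopLoop_perm _ _ _ _ hperm, pvPopLoop_sorted _ _ _ hpair]
  simp
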